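-- pv_equiv track=rewrite | github.com/udit-329/Sorry-eh- | fb_interact.py | count_combtns
-- ===== SOURCE A (Python) =====
-- def count_combtns(combtn_list):
--     """
--     count_combtns(combtn_list : List[x]) : List[Tuple[str]]
--
--     Counts the number of elements for every unique element in the combination list,
--     returning these element counts as a list of 2-length tuples
--     """
--     if combtn_list:
--         combtn_dict = {}
--         for combtn in combtn_list:
--             if (combtn in combtn_dict):
--                 combtn_dict[combtn] += 1
--             else:
--                 combtn_dict[combtn] = 1
--         return list(combtn_dict.items())
--     return []
-- ===== SOURCE B (Python) =====
-- def count_combtns(combtn_list):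
--     """Count occurrences of each element, as (element, count) tuples in first-appearance order."""
--     seen = set()
--     order = []
--     for combtn in combtn_list:
--         if combtn not in seen:
--             seen.add(combtn)
--             order.append(combtn)
--     return [(combtn, combtn_list.count(combtn)) for combtn in order]
-- ===== Notes on version B (the rewrite author's own statement) =====
-- stated objective: alternative
-- what changed: Replaces the dict-of-running-counts with a dedup pass (set-guarded first-appearance list) followed by a per-unique-element list.count scan.
import Mathlib
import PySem

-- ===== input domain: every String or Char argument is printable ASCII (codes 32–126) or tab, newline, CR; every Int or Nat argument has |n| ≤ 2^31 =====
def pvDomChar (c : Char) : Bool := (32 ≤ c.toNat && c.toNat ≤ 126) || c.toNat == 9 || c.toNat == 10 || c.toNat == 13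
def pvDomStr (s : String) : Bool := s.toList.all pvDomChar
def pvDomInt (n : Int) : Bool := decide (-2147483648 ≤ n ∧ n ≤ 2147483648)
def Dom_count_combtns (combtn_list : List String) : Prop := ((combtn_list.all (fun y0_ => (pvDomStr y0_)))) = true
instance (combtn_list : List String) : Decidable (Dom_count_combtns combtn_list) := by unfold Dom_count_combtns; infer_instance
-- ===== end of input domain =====

-- ===== PORT A =====
-- A: dict of running counts, then list(items).
def count_combtns (combtn_list : List String) : List (String × Int) :=
  if combtn_list = [] then []
  else
    (combtn_list.foldl
      (fun d combtn =>
        if d.contains combtn then d.insert combtn (d.getD combtn 0 + 1)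
        else d.insert combtn 1)
      (PySem.Dict.empty : PySem.Dict String Int)).items

-- ===== PORT B =====
-- B: dedup pass (set-guarded first-appearance list), then count each unique element.
def count_combtns_alt (combtn_list : List String) : List (String × Int) :=
  (combtn_list.foldl
    (fun (p : PySem.Set String × List String) combtn =>
      if PySem.Set.contains p.1 combtn then p
      else (PySem.Set.add p.1 combtn, p.2 ++ [combtn]))
    (PySem.Set.empty, [])).2.map
    (fun combtn => (combtn, (combtn_list.count combtn : Int)))

-- ===== PRECONDITION & SPEC =====
def Spec_count_combtns (combtn_list : List String) (out : List (String × Int)) : Prop := out = count_combtns_alt combtn_list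
instance (combtn_list : List String) (out : List (String × Int)) : Decidable (Spec_count_combtns combtn_list out) := by unfold Spec_count_combtns; infer_instance

-- ===== CLAIM (what is proved, stated in full; the proofs are below) =====
def Claim_equal_count_combtns : Prop := ∀ (combtn_list : List String), Dom_count_combtns combtn_list → Spec_count_combtns combtn_list (count_combtns combtn_list)

-- ===== LEMMAS AND PROOFS =====

-- A's fold step collapses to the canonical counter step.
theorem a_fold_eq_counter (xs : List String) :
    xs.foldl
      (fun (d : PySem.Dict String Int) combtn =>
        if d.contains combtn then d.insert combtn (d.getD combtn 0 + 1)
        else d.insert combtn 1)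
      PySem.Dict.empty = PySem.Dict.counter xs := by
  rw [← PySem.Dict.foldl_insert_getD_add_one_eq_counter]
  congr 1
  funext d x
  by_cases h : d.contains x = true
  · rw [if_pos h]
  · have h' : d.contains x = false := by simpa using h
    have h0 : d.getD x 0 = 0 := PySem.Dict.getD_of_not_contains d 0 h'
    rw [if_neg h, h0, zero_add]

-- B's dedup fold keeps seen = order; its order component is the fold of Set.add.
theorem b_fold_inv (xs : List String) (s : PySem.Set String) :
    xs.foldl
      (fun (p : PySem.Set String × List String) combtn =>
        if PySem.Set.contains p.1 combtn then p
        else (PySem.Set.add p.1 combtn, p.2 ++ [combtn]))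
      (s, s) = (xs.foldl PySem.Set.add s, xs.foldl PySem.Set.add s) := by
  induction xs generalizing s with
  | nil => rfl
  | cons x xs ih =>
    rw [List.foldl_cons, List.foldl_cons]
    show List.foldl _
      (if PySem.Set.contains s x then (s, s) else (PySem.Set.add s x, s ++ [x])) xs = _
    by_cases h : PySem.Set.contains s x = true
    · have hm : x ∈ s := by simpa using h
      have hs : PySem.Set.add s x = s := by simp [PySem.Set.add, hm]
      rw [if_pos h, hs]
      exact ih s
    · have hm : x ∉ s := by simpa using h
      rw [if_neg h, show s ++ [x] = PySem.Set.add s x from by simp [PySem.Set.add, hm]]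
      exact ih (PySem.Set.add s x)

-- ===== VERDICT (by name: the statement is the Claim_ definition above) =====
theorem count_combtns_spec : Claim_equal_count_combtns := by
  intro xs _
  show count_combtns xs = count_combtns_alt xs
  unfold count_combtns count_combtns_alt
  have hb := b_fold_inv xs PySem.Set.empty
  rw [show ((PySem.Set.empty : PySem.Set String), ([] : List String)) =
        ((PySem.Set.empty : PySem.Set String), (PySem.Set.empty : PySem.Set String)) from rfl,
     hb]
  split
  · next h => simp [h]
  · simp only [a_fold_eq_counter, PySem.Dict.items_counter, PySem.Set.ofList_eq_foldl]
    rfl
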